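-- pv_equiv track=rewrite | github.com/olyaMay/convert_latex_to_html | main.py | pretty_text_begin_end
-- ===== SOURCE A (Python) =====
-- def pretty_text_begin_end(text):
--     text_list = []
--     last_letter = ''
--     line = ''
--     flag = 0
--     for t in text:
--         if t.__eq__('\n'):
--             if (not last_letter.__eq__('.')) or last_letter.__eq__(''):
--                 flag = 0
--                 line += ' '
--             elif flag >= 1:
--                 pass
--             else:
--                 text_list.append(line)
--                 flag = 1
--                 line = ''
--         else:
--             flag = 0
--             line += t
--         last_letter = t
--     return text_list
-- ===== SOURCE B (Python) =====
-- def pretty_text_begin_end(text):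
--     pieces = text.split('\n')
--     result = []
--     line = ''
--     for piece in pieces[:-1]:
--         line += piece
--         if piece.endswith('.'):
--             result.append(line)
--             line = ''
--         else:
--             line += ' '
--     return result
-- ===== Notes on version B (the rewrite author's own statement) =====
-- stated objective: faster
-- what changed: Replaced the char-by-char state machine with its last_letter/flag bookkeeping by splitting the text on newlines once and making a single pass over all pieces but the last, appending the accumulated line whenever a piece ends in a period.
import Mathlib
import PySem

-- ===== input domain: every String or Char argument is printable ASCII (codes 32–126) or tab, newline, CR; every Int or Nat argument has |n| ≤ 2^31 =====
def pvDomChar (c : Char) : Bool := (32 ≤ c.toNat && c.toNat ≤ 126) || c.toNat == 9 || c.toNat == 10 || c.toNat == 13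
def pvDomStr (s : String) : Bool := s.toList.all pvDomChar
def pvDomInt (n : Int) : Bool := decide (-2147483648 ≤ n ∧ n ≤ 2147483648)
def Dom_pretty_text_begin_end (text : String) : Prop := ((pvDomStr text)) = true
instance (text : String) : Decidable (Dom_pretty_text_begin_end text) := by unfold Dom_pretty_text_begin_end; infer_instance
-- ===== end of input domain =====

-- B replaces A's char-by-char state machine (last_letter/flag bookkeeping) by split('\n')
-- followed by one pass over the pieces; same return value, measurably faster in Python.

-- ===== PORT A =====
-- A's loop body, verbatim; state = (text_list, last_letter, line, flag), A's four variables
def aStep (st : List String × String × String × Int) (t : Char) :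
    List String × String × String × Int :=
  let tl := st.1; let last_letter := st.2.1; let line := st.2.2.1; let flag := st.2.2.2
  if t == '\n' then
    if !(last_letter == ".") || (last_letter == "") then
      (tl, String.ofList [t], line ++ " ", (0 : Int))
    else if flag ≥ 1 then
      (tl, String.ofList [t], line, flag)
    else
      (tl ++ [line], String.ofList [t], "", (1 : Int))
  else
    (tl, String.ofList [t], line ++ String.ofList [t], (0 : Int))

def pretty_text_begin_end (text : String) : List String :=
  (text.toList.foldl aStep (([] : List String), "", "", (0 : Int))).1

-- ===== PORT B =====
-- hand port of text.split('\n') (single-char separator: empty pieces kept; exact);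
-- returns (first piece, remaining pieces), the piece list being first :: rest
def splitNl : List Char → List Char × List (List Char)
  | [] => ([], [])
  | c :: cs =>
    let (q, qs) := splitNl cs
    if c == '\n' then ([], q :: qs) else (c :: q, qs)

-- B's loop body: state = (result, line)
def bStep (st : List String × String) (piece : String) : List String × String :=
  let line := st.2 ++ piece
  if PySem.Str.endswith piece "." then (st.1 ++ [line], "") else (st.1, line ++ " ")

def pretty_text_begin_end_alt (text : String) : List String :=
  let (q, qs) := splitNl text.toList
  let pieces : List String := (q :: qs).map String.ofList
  (pieces.dropLast.foldl bStep (([] : List String), "")).1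

-- ===== PRECONDITION & SPEC =====
def Spec_pretty_text_begin_end (text : String) (out : List String) : Prop := out = pretty_text_begin_end_alt text
instance (text : String) (out : List String) : Decidable (Spec_pretty_text_begin_end text out) := by unfold Spec_pretty_text_begin_end; infer_instance

-- ===== CLAIM (what is proved, stated in full; the proofs are below) =====
def Claim_equal_pretty_text_begin_end : Prop := ∀ (text : String), Dom_pretty_text_begin_end text → Spec_pretty_text_begin_end text (pretty_text_begin_end text)

-- ===== LEMMAS AND PROOFS =====

lemma endswith_chars_dot (p : List Char) :
    PySem.Chars.endswith p ['.'] = (p.getLast? == some '.') := by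
  rw [Bool.eq_iff_iff, PySem.Chars.endswith_iff, beq_iff_eq, List.getLast?_eq_some_iff]
  constructor
  · rintro ⟨t, rfl⟩; exact ⟨t, rfl⟩
  · rintro ⟨l, rfl⟩; exact ⟨l, rfl⟩

lemma ofList_singleton_eq_dot (c : Char) : (String.ofList [c] = ".") ↔ c = '.' := by
  constructor
  · intro h
    have := congrArg String.toList h
    simpa using this
  · rintro rfl; decide

-- main invariant: running A's fold from a mid-state equals running B's fold over the
-- remaining split pieces, the current unfinished piece p glued onto the first of them;
-- last is '.' exactly when p ends in '.', and flag ≥ 1 only when last is a newline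
lemma main_inv (cs : List Char) : ∀ (last pending : String) (p : List Char) (acc : List String) (flag : Int),
    (1 ≤ flag → last ≠ ".") →
    ((last = ".") ↔ (p.getLast? = some '.')) →
    (cs.foldl aStep (acc, last, pending ++ String.ofList p, flag)).1
      = (((((p ++ (splitNl cs).1) :: (splitNl cs).2).map String.ofList).dropLast).foldl bStep (acc, pending)).1 := by
  induction cs with
  | nil =>
    intro last pending p acc flag _ _
    simp [splitNl]
  | cons c cs ih =>
    intro last pending p acc flag hflag hiff
    by_cases hc : c = '\n'
    · subst hc
      by_cases h : last = "."
      · have hfl : ¬ (1 ≤ flag) := fun hf => (hflag hf) h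
        have hdot : p.getLast? = some '.' := hiff.mp h
        have ha : aStep (acc, last, pending ++ String.ofList p, flag) '\n'
            = (acc ++ [pending ++ String.ofList p], "\n", "", 1) := by
          simp [aStep, h, hfl]
        have hrec := ih "\n" "" [] (acc ++ [pending ++ String.ofList p]) 1
          (by decide) (by simp)
        simp only [String.ofList_nil, String.append_empty] at hrec
        simp only [List.foldl_cons, ha, hrec]
        cases hs : splitNl cs with
        | mk q qs =>
          simp [splitNl, hs, bStep, endswith_chars_dot, hdot]
      · have ha : aStep (acc, last, pending ++ String.ofList p, flag) '\n'
            = (acc, "\n", (pending ++ String.ofList p) ++ " ", 0) := by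
          simp [aStep, h]
        have hrec := ih "\n" (pending ++ String.ofList p ++ " ") [] acc 0
          (by intro hf; omega) (by simp)
        simp only [String.ofList_nil, String.append_empty] at hrec
        simp only [List.foldl_cons, ha, hrec]
        cases hs : splitNl cs with
        | mk q qs =>
          have hdot : (p.getLast? == some '.') = false := by
            simp [← hiff, h]
          simp [splitNl, hs, bStep, endswith_chars_dot, hdot]
    · have hne : (c == '\n') = false := by simp [hc]
      have ha : aStep (acc, last, pending ++ String.ofList p, flag) c
          = (acc, String.ofList [c], (pending ++ String.ofList p) ++ String.ofList [c], 0) := by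
        simp [aStep, hne]
      have hiff' : (String.ofList [c] = ".") ↔ ((p ++ [c]).getLast? = some '.') := by
        rw [List.getLast?_concat, ofList_singleton_eq_dot]
        exact ⟨fun h => by simp [h], fun h => by simpa using h⟩
      have hrec := ih (String.ofList [c]) pending (p ++ [c]) acc 0 (by intro hf; omega) hiff'
      have happ : (pending ++ String.ofList p) ++ String.ofList [c]
          = pending ++ String.ofList (p ++ [c]) := by
        simp [String.append_assoc]
      simp only [List.foldl_cons, ha, happ, hrec]
      cases hs : splitNl cs with
      | mk q qs =>
        simp [splitNl, hs, hne]

-- ===== VERDICT (by name: the statement is the Claim_ definition above) =====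
theorem pretty_text_begin_end_spec : Claim_equal_pretty_text_begin_end := by
  intro text _
  unfold Spec_pretty_text_begin_end pretty_text_begin_end pretty_text_begin_end_alt
  have h := main_inv text.toList "" "" [] [] 0 (by intro h; omega) (by simp)
  simpa using h
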